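-- pv_equiv track=rewrite | github.com/Nyanyan/soltvvo | soltvvo_IDAs.py | i2cp
-- ===== SOURCE A (Python) =====
-- from math import factorial
--
-- def i2cp(num):
--     res = []
--     pls = [0 for _ in range(7)]
--     for i in range(7):
--         tmp = factorial(6 - i)
--         res.append(num // tmp + pls[num // tmp])
--         for j in range(num // tmp, 7):
--             pls[j] += 1
--         num -= num // tmp * tmp
--     return res
-- ===== SOURCE B (Python) =====
-- from math import factorial
--
-- def i2cp(num):
--     # Two-pass: pure factorial-base conversion, then add for each digit the
--     # count of earlier digits <= it (same mapping as A's running pls table).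
--     digits = []
--     for i in range(7):
--         tmp = factorial(6 - i)
--         d = num // tmp
--         digits.append(d)
--         num -= d * tmp
--     return [d + sum(1 for e in digits[:i] if e <= d) for i, d in enumerate(digits)]
-- ===== Notes on version B (the rewrite author's own statement) =====
-- stated objective: alternative
-- what changed: Replaces A's single pass with a mutable seven-entry pls suffix-increment table (updated via an inner range loop each iteration) by two passes: a pure factorial-base digit extraction, then a direct count of earlier digits <= the current one.
-- outside the precondition, e.g. on i2cp(-721): A returns [-2, 7, 5, 4, 3, 2, 1], B returns [-2, 6, 5, 4, 3, 2, 1]; on i2cp(-1): A returns [-1, 6, 5, 4, 3, 2, 1], B returns [-1, 6, 5, 4, 3, 2, 1]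
import Mathlib
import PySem

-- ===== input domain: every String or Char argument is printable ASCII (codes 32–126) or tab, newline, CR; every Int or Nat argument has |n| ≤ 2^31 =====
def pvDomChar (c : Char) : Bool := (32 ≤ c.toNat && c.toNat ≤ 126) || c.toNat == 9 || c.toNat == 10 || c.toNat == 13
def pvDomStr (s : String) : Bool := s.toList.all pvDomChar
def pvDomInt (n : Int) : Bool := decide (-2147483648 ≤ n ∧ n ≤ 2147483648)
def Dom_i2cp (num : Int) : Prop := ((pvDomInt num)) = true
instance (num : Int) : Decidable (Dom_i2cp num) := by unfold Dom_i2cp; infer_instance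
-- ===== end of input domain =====

-- B replaces A's running pls suffix-increment table with a pure factorial-base
-- pass followed by a count of earlier digits <= the current one (an alternative
-- decomposition of the same O(1) mapping).

-- ===== PORT A =====
-- loop body of A (res.append, the inner pls loop, num update); pls[j] read/write
-- ported as pyGetD/pySetD (Python negative-index semantics)
def i2cpStep (st : List Int × List Int × Int) (i : Nat) : List Int × List Int × Int :=
  let tmp : Int := (Nat.factorial (6 - i) : Int)
  let d := PySem.Int.floordiv st.2.2 tmp
  (st.1 ++ [d + PySem.List.pyGetD st.2.1 d 0],
   (PySem.List.pyRange d 7 1).foldl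
     (fun pls j => PySem.List.pySetD pls j (PySem.List.pyGetD pls j 0 + 1)) st.2.1,
   st.2.2 - d * tmp)

def i2cp (num : Int) : List Int :=
  ((List.range 7).foldl i2cpStep ([], List.replicate 7 (0 : Int), num)).1

-- ===== PORT B =====
-- first pass of B: pure factorial-base digit extraction
def i2cpAltStep (st : List Int × Int) (i : Nat) : List Int × Int :=
  let tmp : Int := (Nat.factorial (6 - i) : Int)
  let d := PySem.Int.floordiv st.2 tmp
  (st.1 ++ [d], st.2 - d * tmp)

def i2cp_alt (num : Int) : List Int :=
  let digits := ((List.range 7).foldl i2cpAltStep ([], num)).1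
  (PySem.List.enumerate digits 0).map
    (fun p => p.2 + ((PySem.List.slice digits none (some p.1)).countP (fun e => e ≤ p.2) : Int))

-- ===== PRECONDITION & SPEC =====
-- A raises IndexError for num outside [-5040, 5040) (the first read pls[num // 720]
-- is out of range). Pre_ further excludes the negative inputs -5040 ≤ num < 0, on
-- which A still returns: the function decodes an index 0..5039 into a permutation,
-- negative indices are outside that purpose, and A's values there arise from Python
-- negative-index wraparound of the pls table — a corner neither value of which any
-- caller would specify.
def Pre_i2cp (num : Int) : Prop := 0 ≤ num ∧ num < 5040
instance (num : Int) : Decidable (Pre_i2cp num) := by unfold Pre_i2cp; infer_instance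
def pvWitness_i2cp : Int := 100

def Spec_i2cp (num : Int) (out : List Int) : Prop := out = i2cp_alt num
instance (num : Int) (out : List Int) : Decidable (Spec_i2cp num out) := by unfold Spec_i2cp; infer_instance

-- ===== CLAIM (what is proved, stated in full; the proofs are below) =====
def Claim_equal_i2cp : Prop := ∀ (num : Int), Dom_i2cp num → Pre_i2cp num → Spec_i2cp num (i2cp num)

-- ===== LEMMAS AND PROOFS =====

-- A's inner `for j in range(d, 7): pls[j] += 1` on a 7-element table, 0 ≤ d < 7
theorem pvFold (p0 p1 p2 p3 p4 p5 p6 d : Int) (h0 : 0 ≤ d) (h7 : d < 7) :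
    (PySem.List.pyRange d 7 1).foldl
      (fun pls j => PySem.List.pySetD pls j (PySem.List.pyGetD pls j 0 + 1))
      [p0,p1,p2,p3,p4,p5,p6]
    = [p0 + if d ≤ 0 then 1 else 0, p1 + if d ≤ 1 then 1 else 0,
       p2 + if d ≤ 2 then 1 else 0, p3 + if d ≤ 3 then 1 else 0,
       p4 + if d ≤ 4 then 1 else 0, p5 + if d ≤ 5 then 1 else 0,
       p6 + if d ≤ 6 then 1 else 0] := by
  interval_cases d <;>
    simp [show PySem.List.pyRange (0:Int) 7 1 = [0,1,2,3,4,5,6] from by decide,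
      show PySem.List.pyRange (1:Int) 7 1 = [1,2,3,4,5,6] from by decide,
      show PySem.List.pyRange (2:Int) 7 1 = [2,3,4,5,6] from by decide,
      show PySem.List.pyRange (3:Int) 7 1 = [3,4,5,6] from by decide,
      show PySem.List.pyRange (4:Int) 7 1 = [4,5,6] from by decide,
      show PySem.List.pyRange (5:Int) 7 1 = [5,6] from by decide,
      show PySem.List.pyRange (6:Int) 7 1 = [6] from by decide,
      PySem.List.pySetD, PySem.List.pySet?, PySem.List.pyGetD,
      PySem.List.pyGet?, PySem.List.pyIdx?]

-- proof-side only: factorial-base digits of the input and the common closed form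
def pvRem (num : Int) : Nat → Int
  | 0 => num
  | i + 1 => PySem.Int.mod (pvRem num i) (Nat.factorial (6 - i) : Int)
def pvDigit (num : Int) (i : Nat) : Int :=
  PySem.Int.floordiv (pvRem num i) (Nat.factorial (6 - i) : Int)

def pvFB (num : Int) : List Int :=
  let q := pvDigit num 0
  let d1 := pvDigit num 1
  let d2 := pvDigit num 2
  let d3 := pvDigit num 3
  let d4 := pvDigit num 4
  let d5 := pvDigit num 5
  let d6 := pvDigit num 6
  [q,
   d1 + (if q ≤ d1 then 1 else 0),
   d2 + (if q ≤ d2 then 1 else 0) + (if d1 ≤ d2 then 1 else 0),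
   d3 + (if q ≤ d3 then 1 else 0) + (if d1 ≤ d3 then 1 else 0) + (if d2 ≤ d3 then 1 else 0),
   d4 + (if q ≤ d4 then 1 else 0) + (if d1 ≤ d4 then 1 else 0) + (if d2 ≤ d4 then 1 else 0)
      + (if d3 ≤ d4 then 1 else 0),
   d5 + (if q ≤ d5 then 1 else 0) + (if d1 ≤ d5 then 1 else 0) + (if d2 ≤ d5 then 1 else 0)
      + (if d3 ≤ d5 then 1 else 0) + (if d4 ≤ d5 then 1 else 0),
   d6 + (if q ≤ d6 then 1 else 0) + (if d1 ≤ d6 then 1 else 0) + (if d2 ≤ d6 then 1 else 0)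
      + (if d3 ≤ d6 then 1 else 0) + (if d4 ≤ d6 then 1 else 0) + (if d5 ≤ d6 then 1 else 0)]

theorem pvFormB (num : Int) : i2cp_alt num = pvFB num := by
  have hrange : List.range 7 = [0,1,2,3,4,5,6] := by decide
  unfold i2cp_alt
  rw [hrange]
  simp only [List.foldl_cons, List.foldl_nil, i2cpAltStep]
  norm_num [Nat.factorial]
  have hsub2 : ∀ (r b : Int), r - r / b * b = r % b := by
    intro r b; linear_combination -Int.mul_ediv_add_emod r b
  simp only [hsub2]
  simp only [pvFB, pvDigit, pvRem]
  norm_num [Nat.factorial]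
  simp only [show ∀ xs : List Int, PySem.List.slice xs none (some (1:Int)) = xs.take 1 from
      fun xs => by have := PySem.List.slice_to (xs := xs) (b := (1:Int)) (by norm_num); norm_num at this; exact this,
    show ∀ xs : List Int, PySem.List.slice xs none (some (2:Int)) = xs.take 2 from
      fun xs => by have := PySem.List.slice_to (xs := xs) (b := (2:Int)) (by norm_num); norm_num at this; exact this,
    show ∀ xs : List Int, PySem.List.slice xs none (some (3:Int)) = xs.take 3 from
      fun xs => by have := PySem.List.slice_to (xs := xs) (b := (3:Int)) (by norm_num); norm_num at this; exact this,
    show ∀ xs : List Int, PySem.List.slice xs none (some (4:Int)) = xs.take 4 from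
      fun xs => by have := PySem.List.slice_to (xs := xs) (b := (4:Int)) (by norm_num); norm_num at this; exact this,
    show ∀ xs : List Int, PySem.List.slice xs none (some (5:Int)) = xs.take 5 from
      fun xs => by have := PySem.List.slice_to (xs := xs) (b := (5:Int)) (by norm_num); norm_num at this; exact this,
    show ∀ xs : List Int, PySem.List.slice xs none (some (6:Int)) = xs.take 6 from
      fun xs => by have := PySem.List.slice_to (xs := xs) (b := (6:Int)) (by norm_num); norm_num at this; exact this]
  simp only [List.take_succ_cons, List.take_zero, List.countP_cons, List.countP_nil,
    decide_eq_true_eq]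
  refine ⟨?_, ?_, ?_, ?_, ?_, ?_⟩ <;> push_cast <;> ring

theorem pvGetZeros (q : Int) (h0 : -7 ≤ q) (h7 : q < 7) :
    PySem.List.pyGetD [(0:Int),0,0,0,0,0,0] q 0 = 0 := by
  interval_cases q <;> simp [PySem.List.pyGetD, PySem.List.pyGet?, PySem.List.pyIdx?]

theorem pvFormA (num : Int) (hlo : 0 ≤ num) (hhi : num < 5040) :
    i2cp num = pvFB num := by
  have hrange : List.range 7 = [0,1,2,3,4,5,6] := by decide
  have hrep : List.replicate 7 (0:Int) = [0,0,0,0,0,0,0] := rfl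
  unfold i2cp
  rw [hrange, hrep]
  simp only [List.foldl_cons, List.foldl_nil, i2cpStep]
  norm_num [Nat.factorial]
  simp only [pvFB, pvDigit, pvRem]
  norm_num [Nat.factorial]
  have hsub2 : ∀ (r b : Int), r - r / b * b = r % b := by
    intro r b; linear_combination -Int.mul_ediv_add_emod r b
  simp only [hsub2]
  simp only [Int.emod_emod_of_dvd _ (by norm_num : (120:Int) ∣ 720),
    Int.emod_emod_of_dvd _ (by norm_num : (24:Int) ∣ 120),
    Int.emod_emod_of_dvd _ (by norm_num : (6:Int) ∣ 24),
    Int.emod_emod_of_dvd _ (by norm_num : (2:Int) ∣ 6)]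
  have hq1 : 0 ≤ num / 720 := by omega
  have hq2 : num / 720 ≤ 6 := by omega
  have ha1 : 0 ≤ num % 720 / 120 := by omega
  have hb1 : num % 720 / 120 ≤ 5 := by omega
  have ha2 : 0 ≤ num % 120 / 24 := by omega
  have hb2 : num % 120 / 24 ≤ 4 := by omega
  have ha3 : 0 ≤ num % 24 / 6 := by omega
  have hb3 : num % 24 / 6 ≤ 3 := by omega
  have ha4 : 0 ≤ num % 6 / 2 := by omega
  have hb4 : num % 6 / 2 ≤ 2 := by omega
  have ha5 : 0 ≤ num % 2 := by omega
  have hb5 : num % 2 ≤ 1 := by omega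
  generalize hgq : num / 720 = q at *
  generalize hg1 : num % 720 / 120 = d1 at *
  generalize hg2 : num % 120 / 24 = d2 at *
  generalize hg3 : num % 24 / 6 = d3 at *
  generalize hg4 : num % 6 / 2 = d4 at *
  generalize hg5 : num % 2 = d5 at *
  rw [pvFold 0 0 0 0 0 0 0 q hq1 (by omega)]
  rw [pvFold _ _ _ _ _ _ _ d1 ha1 (by omega)]
  rw [pvFold _ _ _ _ _ _ _ d2 ha2 (by omega)]
  rw [pvFold _ _ _ _ _ _ _ d3 ha3 (by omega)]
  rw [pvFold _ _ _ _ _ _ _ d4 ha4 (by omega)]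
  rw [pvFold _ _ _ _ _ _ _ d5 ha5 (by omega)]
  refine ⟨pvGetZeros q (by omega) (by omega), ?_, ?_, ?_, ?_, ?_, ?_⟩
  · interval_cases d1 <;>
      simp [PySem.List.pyGetD, PySem.List.pyGet?, PySem.List.pyIdx?]
  · interval_cases d2 <;>
      simp [PySem.List.pyGetD, PySem.List.pyGet?, PySem.List.pyIdx?] <;> ring
  · interval_cases d3 <;>
      simp [PySem.List.pyGetD, PySem.List.pyGet?, PySem.List.pyIdx?] <;> ring
  · interval_cases d4 <;>
      simp [PySem.List.pyGetD, PySem.List.pyGet?, PySem.List.pyIdx?] <;> ring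
  · interval_cases d5 <;>
      simp [PySem.List.pyGetD, PySem.List.pyGet?, PySem.List.pyIdx?]; ring
  · simp [PySem.List.pyGetD, PySem.List.pyGet?, PySem.List.pyIdx?]

-- ===== VERDICT (by name: the statement is the Claim_ definition above) =====
theorem i2cp_spec : Claim_equal_i2cp := by
  intro num _ hpre
  unfold Spec_i2cp
  rw [pvFormA num hpre.1 hpre.2, pvFormB num]
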